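-- pv_equiv track=rewrite | github.com/ibusmo/Javatar | threads/jdk_manager.py | get_latest_jdk
-- ===== SOURCE A (Python) =====
-- def get_latest_jdk(jdks):
--     """
--     Returns a latest JDK in the dict
--
--     @param jdks: a JDKs dict
--     """
--     jdk_version = [
--         jdk
--         for jdk in jdks
--         if jdk != "use"
--     ]
--     if jdk_version:
--         jdk_version.sort(reverse=True)
--         return jdk_version[0]
--     return None
-- ===== SOURCE B (Python) =====
-- def get_latest_jdk(jdks):
--     """
--     Returns a latest JDK in the dict
--
--     @param jdks: a JDKs dict
--     """
--     best = None
--     for jdk in jdks: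
--         if jdk == "use":
--             continue
--         if best is None or jdk > best:
--             best = jdk
--     return best
-- ===== Notes on version B (the rewrite author's own statement) =====
-- stated objective: faster
-- what changed: Replaces build-filtered-list + reverse sort + take-first with a single running-maximum pass over the keys that skips 'use' and returns None naturally when no key qualifies.
import Mathlib
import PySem

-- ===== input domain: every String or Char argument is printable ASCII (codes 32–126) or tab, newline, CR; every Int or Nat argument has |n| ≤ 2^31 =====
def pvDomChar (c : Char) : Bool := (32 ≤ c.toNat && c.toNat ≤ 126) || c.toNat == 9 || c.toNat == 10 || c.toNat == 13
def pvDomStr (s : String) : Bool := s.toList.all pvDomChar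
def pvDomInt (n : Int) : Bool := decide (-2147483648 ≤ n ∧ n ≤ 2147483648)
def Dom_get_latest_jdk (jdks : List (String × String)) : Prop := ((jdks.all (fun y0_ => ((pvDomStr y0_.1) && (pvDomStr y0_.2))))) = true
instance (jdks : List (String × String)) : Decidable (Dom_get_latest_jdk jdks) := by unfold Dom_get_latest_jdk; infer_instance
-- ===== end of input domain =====

-- B replaces A's build-filtered-list + reverse sort + take-first by a single running-maximum pass (simpler, O(n) vs O(n log n)).


-- ===== PORT A =====
-- iterating a Python dict yields its (distinct) keys in insertion order: dedup of the key column
def get_latest_jdk (jdks : List (String × String)) : Option String :=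
  let jdk_version := (PySem.List.dedup (jdks.map Prod.fst)).filter (fun jdk => jdk ≠ "use")
  if jdk_version.isEmpty then none
  else (PySem.List.sorted jdk_version (fun x => x) true).head?

-- ===== PORT B =====
def get_latest_jdk_alt (jdks : List (String × String)) : Option String :=
  (PySem.List.dedup (jdks.map Prod.fst)).foldl
    (fun best jdk =>
      if jdk == "use" then best
      else match best with
        | none => some jdk
        | some m => if m < jdk then some jdk else best)
    none

-- ===== PRECONDITION & SPEC =====
def Spec_get_latest_jdk (jdks : List (String × String)) (out : Option String) : Prop := out = get_latest_jdk_alt jdks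
instance (jdks : List (String × String)) (out : Option String) : Decidable (Spec_get_latest_jdk jdks out) := by unfold Spec_get_latest_jdk; infer_instance

-- ===== CLAIM (what is proved, stated in full; the proofs are below) =====
def Claim_equal_get_latest_jdk : Prop := ∀ (jdks : List (String × String)), Dom_get_latest_jdk jdks → Spec_get_latest_jdk jdks (get_latest_jdk jdks)

-- ===== LEMMAS AND PROOFS =====

-- B's step on an already-some accumulator is the running max
theorem pv_foldl_step_max (t : List String) (x : String) :
    t.foldl (fun best jdk => match best with
        | none => some jdk
        | some m => if m < jdk then some jdk else best) (some x)
      = some (t.foldl max x) := by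
  induction t generalizing x with
  | nil => rfl
  | cons y t ih =>
      simp only [List.foldl_cons]
      by_cases h : x < y
      · rw [if_pos h, ih, max_eq_right h.le]
      · rw [if_neg h, ih, max_eq_left (not_lt.mp h)]

-- head of a reverse-sorted list of strings is its running max
theorem pv_sorted_rev_head (x : String) (t : List String) :
    (PySem.List.sorted (x :: t) (fun s => s) true).head? = some (t.foldl max x) := by
  have hlen : (PySem.List.sorted (x :: t) (fun s => s) true).length = t.length + 1 := by
    simp [PySem.List.length_sorted]
  cases hs : PySem.List.sorted (x :: t) (fun s => s) true with
  | nil => simp [hs] at hlen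
  | cons m rest =>
      have hge : ∀ y ∈ (x :: t), y ≤ m := by
        intro y hy
        have := PySem.List.key_head_sorted_rev_ge (xs := x :: t) (key := fun s => s) hs y hy
        simpa using this
      have hmem : m ∈ (x :: t) := by
        have hperm := PySem.List.sorted_perm (xs := x :: t) (key := fun s => s) (rev := true)
        exact hperm.mem_iff.mp (by simp [hs])
      have hmax := PySem.List.le_foldl_max t x
      have h1 : m ≤ t.foldl max x := by
        rcases List.mem_cons.mp hmem with h | h
        · exact h ▸ hmax.1
        · exact hmax.2 m h
      have h2 : t.foldl max x ≤ m := by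
        rcases PySem.List.foldl_max_mem t x with h | h
        · rw [h]; exact hge x (by simp)
        · exact hge _ (List.mem_cons_of_mem _ h)
      simp [le_antisymm h2 h1]

-- B skips "use" inline; that equals folding over the filtered list
theorem pv_skip_use (ks : List String) (acc : Option String) :
    ks.foldl (fun best jdk =>
        if jdk == "use" then best
        else match best with
          | none => some jdk
          | some m => if m < jdk then some jdk else best) acc
      = (ks.filter (fun jdk => jdk ≠ "use")).foldl (fun best jdk =>
          match best with
          | none => some jdk
          | some m => if m < jdk then some jdk else best) acc := by
  induction ks generalizing acc with
  | nil => rfl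
  | cons y t ih =>
      simp only [List.foldl_cons, List.filter_cons]
      by_cases hy : y = "use"
      · rw [if_pos (by simp [hy]), if_neg (by simp [hy])]
        exact ih acc
      · rw [if_neg (by simp [hy]), if_pos (by simp [hy]), List.foldl_cons]
        exact ih _

theorem pv_main (ks : List String) :
    (let jv := ks.filter (fun jdk => jdk ≠ "use");
     if jv.isEmpty then none else (PySem.List.sorted jv (fun x => x) true).head?)
      = ks.foldl (fun best jdk =>
          if jdk == "use" then best
          else match best with
            | none => some jdk
            | some m => if m < jdk then some jdk else best) none := by
  rw [pv_skip_use]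
  cases hf : ks.filter (fun jdk => jdk ≠ "use") with
  | nil => simp
  | cons x t =>
      simp only [List.isEmpty_cons, List.foldl_cons]
      rw [pv_foldl_step_max, pv_sorted_rev_head]
      simp

-- ===== VERDICT (by name: the statement is the Claim_ definition above) =====
theorem get_latest_jdk_spec : Claim_equal_get_latest_jdk := by
  intro jdks _
  unfold Spec_get_latest_jdk get_latest_jdk get_latest_jdk_alt
  exact pv_main (PySem.List.dedup (jdks.map Prod.fst))
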